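-- pv_equiv track=rewrite | github.com/Wissal-Chbani/cerema-analyzer-service | src/preprocessing/text_cleaner.py | remove_header_footer
-- ===== SOURCE A (Python) =====
-- def remove_header_footer(text: str, header_keyword: str = None,
--                         footer_keyword: str = None) -> str:
--     """
--     Supprime les en-têtes et pieds de page
--
--     Args:
--         text: Texte complet
--         header_keyword: Mot-clé marquant la fin de l'en-tête
--         footer_keyword: Mot-clé marquant le début du pied de page
--
--     Returns:
--         Texte sans en-tête ni pied de page
--     """
--     lines = text.split('\n')
--
--     # Trouver le début du contenu réel
--     start_idx = 0
--     if header_keyword: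
--         for i, line in enumerate(lines):
--             if header_keyword.lower() in line.lower():
--                 start_idx = i + 1
--                 break
--
--     # Trouver la fin du contenu réel
--     end_idx = len(lines)
--     if footer_keyword:
--         for i in range(len(lines) - 1, -1, -1):
--             if footer_keyword.lower() in lines[i].lower():
--                 end_idx = i
--                 break
--
--     return '\n'.join(lines[start_idx:end_idx])
-- ===== SOURCE B (Python) =====
-- def remove_header_footer(text: str, header_keyword: str = None,
--                         footer_keyword: str = None) -> str:
--     """Single forward pass: first header match fixes the start, the last
--     footer match fixes the end."""
--     lines = text.split('\n')
--     hk = header_keyword.lower() if header_keyword else None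
--     fk = footer_keyword.lower() if footer_keyword else None
--     start_idx, header_found, end_idx = 0, False, len(lines)
--     for i, line in enumerate(lines):
--         low = line.lower()
--         if hk is not None and not header_found and hk in low:
--             start_idx, header_found = i + 1, True
--         if fk is not None and fk in low:
--             end_idx = i
--     return '\n'.join(lines[start_idx:end_idx])
-- ===== Notes on version B (the rewrite author's own statement) =====
-- stated objective: alternative
-- what changed: Replaces A's two separate scans (a forward scan for the header and a dedicated backward scan for the footer) by one forward pass over enumerate(lines) that keeps start_idx/header_found (first match, never reset) and end_idx (overwritten on every match, so the last occurrence wins).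
import Mathlib
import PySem

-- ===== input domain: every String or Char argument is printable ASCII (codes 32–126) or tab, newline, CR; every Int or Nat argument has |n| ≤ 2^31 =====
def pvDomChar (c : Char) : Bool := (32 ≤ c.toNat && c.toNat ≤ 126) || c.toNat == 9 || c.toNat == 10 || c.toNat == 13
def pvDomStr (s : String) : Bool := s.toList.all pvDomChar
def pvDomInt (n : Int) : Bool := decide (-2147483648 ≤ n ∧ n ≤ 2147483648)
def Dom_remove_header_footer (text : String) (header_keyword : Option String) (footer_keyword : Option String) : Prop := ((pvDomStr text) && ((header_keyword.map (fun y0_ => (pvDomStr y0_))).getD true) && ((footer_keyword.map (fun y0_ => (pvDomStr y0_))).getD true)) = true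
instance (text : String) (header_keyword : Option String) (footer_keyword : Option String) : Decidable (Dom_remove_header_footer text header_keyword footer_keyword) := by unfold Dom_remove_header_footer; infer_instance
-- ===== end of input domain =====

-- B is an ALTERNATIVE decomposition (same cost): one forward pass replaces A's forward header scan plus dedicated backward footer scan.

-- ===== PORT A =====
-- forward loop 'for i, line in enumerate(lines): if kw.lower() in line.lower(): start_idx = i+1; break'
def pvFindHeaderA (kw : List Char) : List String → Int → Int
  | [], _ => 0
  | line :: rest, i =>
      if PySem.Chars.isIn (PySem.Chars.lower kw) (PySem.Chars.lower line.toList) then i + 1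
      else pvFindHeaderA kw rest (i + 1)

-- backward loop 'for i in range(len(lines)-1, -1, -1): if … in lines[i].lower(): end_idx = i; break':
-- iterating i downward over lines[i] is walking lines.reverse with a descending index counter.
def pvFindFooterA (kw : List Char) : List String → Int → Int → Int
  | [], _, dflt => dflt
  | line :: rest, i, dflt =>
      if PySem.Chars.isIn (PySem.Chars.lower kw) (PySem.Chars.lower line.toList) then i
      else pvFindFooterA kw rest (i - 1) dflt

def remove_header_footer (text : String) (header_keyword : Option String) (footer_keyword : Option String) : String :=
  let lines := (PySem.Str.split? text "\n").getD []  -- sep is the literal "\n" ≠ "", so split? is always some: exact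
  let start_idx : Int :=
    match header_keyword with
    | some hk => if hk = "" then 0 else pvFindHeaderA hk.toList lines 0  -- 'if header_keyword:' = truthiness
    | none => 0
  let end_idx : Int :=
    match footer_keyword with
    | some fk =>
        if fk = "" then PySem.List.len lines
        else pvFindFooterA fk.toList lines.reverse (PySem.List.len lines - 1) (PySem.List.len lines)
    | none => PySem.List.len lines
  PySem.Str.join "\n" (PySem.List.slice lines (some start_idx) (some end_idx))

-- ===== PORT B =====
-- one iteration of B's single forward loop over (i, line), state (start_idx, header_found, end_idx)
def pvAltStep (hk fk : Option (List Char)) (st : Int × Bool × Int) (p : Int × String) : Int × Bool × Int :=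
  let low := PySem.Chars.lower p.2.toList
  let sf : Int × Bool :=
    match hk with
    | some k => if !st.2.1 && PySem.Chars.isIn k low then (p.1 + 1, true) else (st.1, st.2.1)
    | none => (st.1, st.2.1)
  let en : Int :=
    match fk with
    | some k => if PySem.Chars.isIn k low then p.1 else st.2.2
    | none => st.2.2
  (sf.1, sf.2, en)

def remove_header_footer_alt (text : String) (header_keyword : Option String) (footer_keyword : Option String) : String :=
  let lines := (PySem.Str.split? text "\n").getD []  -- sep is the literal "\n" ≠ "", so split? is always some: exact
  let hk := header_keyword.bind (fun s => if s = "" then none else some (PySem.Chars.lower s.toList))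
  let fk := footer_keyword.bind (fun s => if s = "" then none else some (PySem.Chars.lower s.toList))
  let st := (PySem.List.enumerate lines 0).foldl (pvAltStep hk fk) (0, false, PySem.List.len lines)
  PySem.Str.join "\n" (PySem.List.slice lines (some st.1) (some st.2.2))

-- ===== PRECONDITION & SPEC =====
def Spec_remove_header_footer (text : String) (header_keyword : Option String) (footer_keyword : Option String) (out : String) : Prop := out = remove_header_footer_alt text header_keyword footer_keyword
instance (text : String) (header_keyword : Option String) (footer_keyword : Option String) (out : String) : Decidable (Spec_remove_header_footer text header_keyword footer_keyword out) := by unfold Spec_remove_header_footer; infer_instance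

-- ===== CLAIM (what is proved, stated in full; the proofs are below) =====
def Claim_equal_remove_header_footer : Prop := ∀ (text : String) (header_keyword : Option String) (footer_keyword : Option String), Dom_remove_header_footer text header_keyword footer_keyword → Spec_remove_header_footer text header_keyword footer_keyword (remove_header_footer text header_keyword footer_keyword)

-- ===== LEMMAS AND PROOFS =====

-- first index i+1 whose line matches k (k already lowered), default d
def pvHdr (k : List Char) : List String → Int → Int → Int
  | [], _, d => d
  | l :: ls, i, d =>
      if PySem.Chars.isIn k (PySem.Chars.lower l.toList) then i + 1 else pvHdr k ls (i + 1) d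

-- last index i whose line matches k, default d
def pvLast (k : List Char) : List String → Int → Int → Int
  | [], _, d => d
  | l :: ls, i, d =>
      pvLast k ls (i + 1) (if PySem.Chars.isIn k (PySem.Chars.lower l.toList) then i else d)

theorem pvFindHeaderA_eq_pvHdr (kw : List Char) (ls : List String) (i : Int) :
    pvFindHeaderA kw ls i = pvHdr (PySem.Chars.lower kw) ls i 0 := by
  induction ls generalizing i with
  | nil => rfl
  | cons l ls ih => simp only [pvFindHeaderA, pvHdr, ih]

theorem pvFindFooterA_append (kw : List Char) (xs ys : List String) (j d : Int) :
    pvFindFooterA kw (xs ++ ys) j d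
      = pvFindFooterA kw xs j (pvFindFooterA kw ys (j - xs.length) d) := by
  induction xs generalizing j with
  | nil => simp [pvFindFooterA]
  | cons x xs ih =>
      simp only [List.cons_append, pvFindFooterA, ih]
      split_ifs with h
      · rfl
      · have he : j - 1 - (xs.length : Int) = j - ((x :: xs).length : Int) := by
          simp [List.length_cons]; ring
        rw [he]

theorem pvFindFooterA_reverse (kw : List Char) (ls : List String) (i d : Int) :
    pvFindFooterA kw ls.reverse (i + (ls.length : Int) - 1) d
      = pvLast (PySem.Chars.lower kw) ls i d := by
  induction ls generalizing i d with
  | nil => rfl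
  | cons l ls ih =>
      simp only [List.reverse_cons, pvLast]
      rw [pvFindFooterA_append]
      have h1 : i + ((l :: ls).length : Int) - 1 - (ls.reverse.length : Int) = i := by
        simp; ring
      have h2 : i + ((l :: ls).length : Int) - 1 = (i + 1) + (ls.length : Int) - 1 := by
        simp; ring
      rw [h1, h2, ih]
      simp [pvFindFooterA]

theorem pvFold_enum (hk fk : Option (List Char)) (ls : List String) :
    ∀ (i start en : Int) (found : Bool),
    (PySem.List.enumerate ls i).foldl (pvAltStep hk fk) (start, found, en) =
      ((if found then start else
          match hk with
          | none => start
          | some k => pvHdr k ls i start),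
       (found || match hk with
          | none => false
          | some k => ls.any (fun l => PySem.Chars.isIn k (PySem.Chars.lower l.toList))),
       (match fk with
          | none => en
          | some k => pvLast k ls i en)) := by
  induction ls with
  | nil =>
      intro i start en found
      cases hk <;> cases fk <;> cases found <;> simp [PySem.List.enumerate_nil, pvHdr, pvLast]
  | cons l ls ih =>
      intro i start en found
      rw [PySem.List.enumerate_cons, List.foldl_cons]
      cases hk with
      | none =>
          cases fk with
          | none =>
              rw [ih]; cases found <;> simp [pvAltStep]
          | some k =>
              rw [ih]; cases found <;> simp [pvAltStep, pvLast]
      | some kh =>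
          cases fk with
          | none =>
              rw [ih]
              cases found <;>
                by_cases hm : PySem.Chars.isIn kh (PySem.Chars.lower l.toList) <;>
                  simp [pvAltStep, pvHdr, hm]
          | some k =>
              rw [ih]
              cases found <;>
                by_cases hm : PySem.Chars.isIn kh (PySem.Chars.lower l.toList) <;>
                  simp [pvAltStep, pvHdr, pvLast, hm]

-- ===== VERDICT (by name: the statement is the Claim_ definition above) =====
theorem remove_header_footer_spec : Claim_equal_remove_header_footer := by
  intro text header_keyword footer_keyword _
  show _ = _
  simp only [remove_header_footer, remove_header_footer_alt]
  set lines := (PySem.Str.split? text "\n").getD [] with hlines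
  rw [pvFold_enum]
  have hrev : ∀ kw : List Char,
      pvFindFooterA kw lines.reverse ((lines.length : Int) - 1) (lines.length : Int)
        = pvLast (PySem.Chars.lower kw) lines 0 (lines.length : Int) := by
    intro kw
    have := pvFindFooterA_reverse kw lines 0 (lines.length : Int)
    simpa using this
  cases header_keyword with
  | none =>
      cases footer_keyword with
      | none => simp
      | some fk =>
          by_cases hf : fk = "" <;> simp [hf, hrev fk.toList]
  | some hk =>
      cases footer_keyword with
      | none =>
          by_cases hh : hk = "" <;>
            simp [hh, pvFindHeaderA_eq_pvHdr]
      | some fk =>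
          by_cases hh : hk = "" <;> by_cases hf : fk = "" <;>
            simp [hh, hf, pvFindHeaderA_eq_pvHdr, hrev fk.toList]
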